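-- pv_equiv track=rewrite | github.com/steveogborne/advent-of-code | 2023/11/solver2.py | get_empty_lines
-- ===== SOURCE A (Python) =====
-- def get_empty_lines(A, B, line_indexes, column_indexes):
--     empty_lines_passed = 0
--     line_refs = sorted([A[0], B[0]])
--     col_refs = sorted([A[1], B[1]])
--     for l_index in range(line_refs[0],line_refs[1]):
--         if l_index in line_indexes:
--             empty_lines_passed +=1
--     for c_index in range(col_refs[0],col_refs[1]):
--         if c_index in column_indexes:
--             empty_lines_passed +=1
--     empty_lines_passed *= 999999
--     return(empty_lines_passed)
-- ===== SOURCE B (Python) =====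
-- def get_empty_lines(A, B, line_indexes, column_indexes):
--     lo_l, hi_l = min(A[0], B[0]), max(A[0], B[0])
--     lo_c, hi_c = min(A[1], B[1]), max(A[1], B[1])
--     n = sum(1 for x in set(line_indexes) if lo_l <= x < hi_l)
--     n += sum(1 for x in set(column_indexes) if lo_c <= x < hi_c)
--     return n * 999999
-- ===== Notes on version B (the rewrite author's own statement) =====
-- stated objective: faster
-- what changed: Instead of scanning every integer between the two coordinates and testing list membership, B iterates once over the deduplicated index lists and counts those falling inside the half-open range, so cost depends on the number of stored indexes rather than on the coordinate distance.
import Mathlib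
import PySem

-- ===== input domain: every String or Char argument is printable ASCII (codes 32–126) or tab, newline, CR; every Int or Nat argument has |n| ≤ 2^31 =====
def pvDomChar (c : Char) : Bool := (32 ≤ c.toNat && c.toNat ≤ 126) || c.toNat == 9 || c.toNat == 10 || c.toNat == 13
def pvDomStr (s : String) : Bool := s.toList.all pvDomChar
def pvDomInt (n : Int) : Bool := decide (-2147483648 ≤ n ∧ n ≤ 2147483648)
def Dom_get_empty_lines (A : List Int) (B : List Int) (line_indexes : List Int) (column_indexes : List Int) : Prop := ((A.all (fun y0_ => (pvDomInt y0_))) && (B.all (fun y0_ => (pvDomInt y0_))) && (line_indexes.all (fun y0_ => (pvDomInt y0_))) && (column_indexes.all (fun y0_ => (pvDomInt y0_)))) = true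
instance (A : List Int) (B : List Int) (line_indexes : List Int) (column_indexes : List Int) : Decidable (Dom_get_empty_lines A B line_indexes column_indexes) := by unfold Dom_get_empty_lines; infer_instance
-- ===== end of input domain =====

-- B counts in one pass over the deduplicated index lists instead of scanning the whole
-- coordinate range: asymptotically faster when the coordinates are far apart.

-- ===== PORT A =====
def get_empty_lines (A : List Int) (B : List Int) (line_indexes : List Int) (column_indexes : List Int) : Int :=
  let empty_lines_passed : Int := 0
  let line_refs := PySem.List.sorted [(PySem.List.pyGet? A 0).getD 0, (PySem.List.pyGet? B 0).getD 0] (fun x => x) false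
  let col_refs := PySem.List.sorted [(PySem.List.pyGet? A 1).getD 0, (PySem.List.pyGet? B 1).getD 0] (fun x => x) false
  let empty_lines_passed :=
    (PySem.List.pyRange ((PySem.List.pyGet? line_refs 0).getD 0) ((PySem.List.pyGet? line_refs 1).getD 0) 1).foldl
      (fun acc l_index => if line_indexes.contains l_index then acc + 1 else acc) empty_lines_passed
  let empty_lines_passed :=
    (PySem.List.pyRange ((PySem.List.pyGet? col_refs 0).getD 0) ((PySem.List.pyGet? col_refs 1).getD 0) 1).foldl
      (fun acc c_index => if column_indexes.contains c_index then acc + 1 else acc) empty_lines_passed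
  empty_lines_passed * 999999

-- ===== PORT B =====
def get_empty_lines_alt (A : List Int) (B : List Int) (line_indexes : List Int) (column_indexes : List Int) : Int :=
  let lo_l := min ((PySem.List.pyGet? A 0).getD 0) ((PySem.List.pyGet? B 0).getD 0)
  let hi_l := max ((PySem.List.pyGet? A 0).getD 0) ((PySem.List.pyGet? B 0).getD 0)
  let lo_c := min ((PySem.List.pyGet? A 1).getD 0) ((PySem.List.pyGet? B 1).getD 0)
  let hi_c := max ((PySem.List.pyGet? A 1).getD 0) ((PySem.List.pyGet? B 1).getD 0)
  let n : Int := ((PySem.Set.ofList line_indexes).countP (fun x => decide (lo_l ≤ x ∧ x < hi_l)) : Int)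
  let n := n + ((PySem.Set.ofList column_indexes).countP (fun x => decide (lo_c ≤ x ∧ x < hi_c)) : Int)
  n * 999999

-- ===== PRECONDITION & SPEC =====
-- Pre_ excludes exactly the inputs where Python A raises IndexError: a point list with fewer than 2 coordinates.
def Pre_get_empty_lines (A : List Int) (B : List Int) (line_indexes : List Int) (column_indexes : List Int) : Prop :=
  2 ≤ A.length ∧ 2 ≤ B.length
instance (A : List Int) (B : List Int) (line_indexes : List Int) (column_indexes : List Int) : Decidable (Pre_get_empty_lines A B line_indexes column_indexes) := by unfold Pre_get_empty_lines; infer_instance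
def pvWitness_get_empty_lines : List Int × List Int × List Int × List Int := ([1, 2], [5, 0], [3, 4], [1])

def Spec_get_empty_lines (A : List Int) (B : List Int) (line_indexes : List Int) (column_indexes : List Int) (out : Int) : Prop := out = get_empty_lines_alt A B line_indexes column_indexes
instance (A : List Int) (B : List Int) (line_indexes : List Int) (column_indexes : List Int) (out : Int) : Decidable (Spec_get_empty_lines A B line_indexes column_indexes out) := by unfold Spec_get_empty_lines; infer_instance

-- ===== CLAIM (what is proved, stated in full; the proofs are below) =====
def Claim_equal_get_empty_lines : Prop := ∀ (A : List Int) (B : List Int) (line_indexes : List Int) (column_indexes : List Int), Dom_get_empty_lines A B line_indexes column_indexes → Pre_get_empty_lines A B line_indexes column_indexes → Spec_get_empty_lines A B line_indexes column_indexes (get_empty_lines A B line_indexes column_indexes)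

-- ===== LEMMAS AND PROOFS =====

-- The range scan counts the same finite set as the dedup scan: {x | lo ≤ x < hi ∧ x ∈ L}.
theorem pv_count_range_eq (lo hi : Int) (L : List Int) :
    (PySem.List.pyRange lo hi 1).countP (fun i => L.contains i)
      = (PySem.Set.ofList L).countP (fun x => decide (lo ≤ x ∧ x < hi)) := by
  rw [List.countP_eq_length_filter, List.countP_eq_length_filter]
  have h1 : ((PySem.List.pyRange lo hi 1).filter (fun i => L.contains i)).Nodup :=
    (PySem.List.nodup_pyRange_one lo hi).filter _
  have h2 : (((PySem.Set.ofList L : List Int)).filter (fun x => decide (lo ≤ x ∧ x < hi))).Nodup :=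
    (PySem.Set.nodup_ofList L).filter _
  rw [← List.toFinset_card_of_nodup h1, ← List.toFinset_card_of_nodup h2]
  congr 1
  ext x
  simp [PySem.List.mem_pyRange_one, PySem.Set.mem_ofList]
  tauto

-- indexing a two-element literal list
theorem pv_pyGet_pair_zero (x y : Int) : (PySem.List.pyGet? [x, y] 0).getD 0 = x := by
  simp [PySem.List.pyGet?, PySem.List.pyIdx?]
theorem pv_pyGet_pair_one (x y : Int) : (PySem.List.pyGet? [x, y] 1).getD 0 = y := by
  simp [PySem.List.pyGet?, PySem.List.pyIdx?]

-- sorted of a two-element list, elementwise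
theorem pv_sorted_pair (a b : Int) :
    PySem.List.sorted [a, b] (fun x => x) false = [min a b, max a b] := by
  rcases le_total a b with h | h
  · simp only [min_eq_left h, max_eq_right h]
    exact PySem.List.sorted_id_eq_of_perm_of_pairwise _ _ (List.Perm.refl _) (by simp [h])
  · simp only [min_eq_right h, max_eq_left h]
    exact PySem.List.sorted_id_eq_of_perm_of_pairwise _ _ (List.Perm.swap a b []) (by simp [h])

-- ===== VERDICT (by name: the statement is the Claim_ definition above) =====
theorem get_empty_lines_spec : Claim_equal_get_empty_lines := by
  intro A B line_indexes column_indexes _ _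
  unfold Spec_get_empty_lines get_empty_lines get_empty_lines_alt
  rw [pv_sorted_pair, pv_sorted_pair]
  generalize (PySem.List.pyGet? A 0).getD 0 = a0
  generalize (PySem.List.pyGet? B 0).getD 0 = b0
  generalize (PySem.List.pyGet? A 1).getD 0 = a1
  generalize (PySem.List.pyGet? B 1).getD 0 = b1
  simp only [PySem.List.foldl_if_add_one, pv_count_range_eq, pv_pyGet_pair_zero, pv_pyGet_pair_one,
    zero_add]
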